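-- pv_equiv track=rewrite | github.com/Makani-C/FairvoteRCVApp | app/utils/results.py | _find_top_choice
-- ===== SOURCE A (Python) =====
-- from typing import List, Dict, Any, Optional, Set, Tuple
--
-- def _find_top_choice(preferences: Dict[int, int], remaining_options: Set[int]) -> Optional[int]:
--     """Find a voter's highest-ranked option among those that remain in the election."""
--     valid_preferences = {
--         option_id: rank for option_id, rank in preferences.items()
--         if option_id in remaining_options
--     }
--
--     if not valid_preferences:
--         return None
--
--     # Find the option with the lowest rank value (highest preference)
--     return min(valid_preferences.items(), key=lambda x: x[1])[0]
-- ===== SOURCE B (Python) =====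
-- from typing import Dict, Optional, Set
--
-- def _find_top_choice(preferences: Dict[int, int], remaining_options: Set[int]) -> Optional[int]:
--     """Sort-then-scan: stable-sort preferences by rank (ascending), then return the
--     first option that is still in the election; stability makes ties resolve exactly
--     as min()'s first-wins rule in the original."""
--     for option_id, _rank in sorted(preferences.items(), key=lambda item: item[1]):
--         if option_id in remaining_options:
--             return option_id
--     return None
-- ===== Notes on version B (the rewrite author's own statement) =====
-- stated objective: alternative
-- what changed: Replaced filter-into-a-dict then min()-with-key by sort-then-scan: stable-sort all preferences by rank and return the first option still remaining (stability reproduces min's first-wins tie rule).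
import Mathlib
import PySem

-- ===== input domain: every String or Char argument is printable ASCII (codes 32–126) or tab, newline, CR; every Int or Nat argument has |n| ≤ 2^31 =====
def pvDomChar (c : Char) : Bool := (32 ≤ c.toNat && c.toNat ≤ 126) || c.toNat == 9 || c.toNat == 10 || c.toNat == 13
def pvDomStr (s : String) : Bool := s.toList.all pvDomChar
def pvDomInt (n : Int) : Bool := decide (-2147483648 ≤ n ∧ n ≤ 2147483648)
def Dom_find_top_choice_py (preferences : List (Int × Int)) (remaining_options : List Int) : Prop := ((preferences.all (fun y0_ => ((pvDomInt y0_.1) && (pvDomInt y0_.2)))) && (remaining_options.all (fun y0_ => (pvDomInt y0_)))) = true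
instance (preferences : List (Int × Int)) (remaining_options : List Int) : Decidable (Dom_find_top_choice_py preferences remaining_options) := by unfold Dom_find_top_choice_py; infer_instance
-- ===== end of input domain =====

-- B replaces A's filter-then-min by sort-then-scan (stable sort by rank, first remaining option wins); alternative decomposition, same result.
-- ===== PORT A =====
def find_top_choice_py (preferences : List (Int × Int)) (remaining_options : List Int) : Option Int :=
  let valid_preferences := preferences.filter (fun kv => remaining_options.contains kv.1)
  if valid_preferences.isEmpty then none
  else (PySem.List.min? valid_preferences (fun x => x.2)).map (fun m => m.1)

-- ===== PORT B =====
def find_top_choice_py_alt (preferences : List (Int × Int)) (remaining_options : List Int) : Option Int :=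
  ((PySem.List.sorted preferences (fun item => item.2) false).find?
      (fun kv => remaining_options.contains kv.1)).map (fun kv => kv.1)

-- ===== PRECONDITION & SPEC =====
def Spec_find_top_choice_py (preferences : List (Int × Int)) (remaining_options : List Int) (out : Option Int) : Prop := out = find_top_choice_py_alt preferences remaining_options
instance (preferences : List (Int × Int)) (remaining_options : List Int) (out : Option Int) : Decidable (Spec_find_top_choice_py preferences remaining_options out) := by unfold Spec_find_top_choice_py; infer_instance

-- ===== CLAIM =====
def Claim_equal_find_top_choice_py : Prop := ∀ (preferences : List (Int × Int)) (remaining_options : List Int), Dom_find_top_choice_py preferences remaining_options → Spec_find_top_choice_py preferences remaining_options (find_top_choice_py preferences remaining_options)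

-- ===== LEMMAS AND PROOFS =====

-- inserting an element strictly below everything in l puts it at the head
theorem pv_insertBy_all_lt (x : Int × Int) (l : List (Int × Int))
    (h : ∀ z ∈ l, x.2 < z.2) :
    PySem.List.insertBy (fun a b => decide (a.2 < b.2)) x l = x :: l := by
  cases l with
  | nil => rfl
  | cons z t =>
    have : x.2 < z.2 := h z (List.mem_cons_self)
    simp [PySem.List.insertBy, this]

-- filtering commutes with a single stable insertion into a rank-sorted list
theorem pv_filter_insertBy (p : Int × Int → Bool) (x : Int × Int) :
    ∀ (ys : List (Int × Int)), ys.Pairwise (fun a b => a.2 ≤ b.2) →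
    (PySem.List.insertBy (fun a b => decide (a.2 < b.2)) x ys).filter p
      = if p x then PySem.List.insertBy (fun a b => decide (a.2 < b.2)) x (ys.filter p)
        else ys.filter p := by
  intro ys
  induction ys with
  | nil =>
    intro _
    by_cases hpx : p x = true <;> simp [PySem.List.insertBy, hpx]
  | cons y t ih =>
    intro hp
    rw [List.pairwise_cons] at hp
    obtain ⟨hy, ht⟩ := hp
    by_cases hxy : x.2 < y.2
    · -- x goes before y
      have hins : PySem.List.insertBy (fun a b => decide (a.2 < b.2)) x (y :: t) = x :: y :: t := by
        simp [PySem.List.insertBy, hxy]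
      rw [hins]
      by_cases hpy : p y = true
      · simp only [List.filter_cons, hpy, if_true]
        by_cases hpx : p x = true
        · simp [hpx, PySem.List.insertBy, hxy]
        · simp [hpx]
      · simp only [List.filter_cons, hpy]
        by_cases hpx : p x = true
        · have hall : ∀ z ∈ t.filter p, x.2 < z.2 := by
            intro z hz
            exact lt_of_lt_of_le hxy (hy z (List.mem_of_mem_filter hz))
          simp [hpx, pv_insertBy_all_lt x (t.filter p) hall]
        · simp [hpx]
    · -- x goes after y
      have hins : PySem.List.insertBy (fun a b => decide (a.2 < b.2)) x (y :: t)
          = y :: PySem.List.insertBy (fun a b => decide (a.2 < b.2)) x t := by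
        simp [PySem.List.insertBy, hxy]
      rw [hins]
      by_cases hpy : p y = true
      · simp only [List.filter_cons, hpy, if_true, ih ht]
        by_cases hpx : p x = true
        · have : PySem.List.insertBy (fun a b => decide (a.2 < b.2)) x (y :: t.filter p)
              = y :: PySem.List.insertBy (fun a b => decide (a.2 < b.2)) x (t.filter p) := by
            simp [PySem.List.insertBy, hxy]
          simp [hpx, this]
        · simp [hpx]
      · simp [hpy, ih ht]

-- filtering commutes with the whole stable sort
theorem pv_sorted_filter (p : Int × Int → Bool) (xs : List (Int × Int)) :
    (PySem.List.sorted xs (fun item => item.2) false).filter p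
      = PySem.List.sorted (xs.filter p) (fun item => item.2) false := by
  induction xs using List.reverseRecOn with
  | nil => rfl
  | append_singleton t x ih =>
    have hsa : ∀ (l : List (Int × Int)),
        PySem.List.sorted (l ++ [x]) (fun item => item.2) false
          = PySem.List.insertBy (fun a b => decide (a.2 < b.2)) x
              (PySem.List.sorted l (fun item => item.2) false) := by
      intro l
      rw [PySem.List.sorted_eq_foldl_insertBy, PySem.List.sorted_eq_foldl_insertBy,
        List.foldl_append]
      rfl
    rw [hsa t,
      pv_filter_insertBy p x _ (PySem.List.sorted_pairwise t (fun item => item.2)),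
      List.filter_append]
    by_cases hpx : p x = true
    · simp only [List.filter_cons, hpx, if_true, List.filter_nil, hsa (t.filter p), ih]
    · simp [hpx, ih]

-- Python's min(…, key) is the head of the stable sort by the same key
theorem pv_min?_eq_head?_sorted (xs : List (Int × Int)) :
    PySem.List.min? xs (fun item => item.2)
      = (PySem.List.sorted xs (fun item => item.2) false).head? := by
  induction xs using List.reverseRecOn with
  | nil => rfl
  | append_singleton t x ih =>
    have hsa : PySem.List.sorted (t ++ [x]) (fun item => item.2) false
        = PySem.List.insertBy (fun a b => decide (a.2 < b.2)) x
            (PySem.List.sorted t (fun item => item.2) false) := by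
      rw [PySem.List.sorted_eq_foldl_insertBy, PySem.List.sorted_eq_foldl_insertBy,
        List.foldl_append]
      rfl
    rw [hsa]
    cases hs : PySem.List.sorted t (fun item => item.2) false with
    | nil =>
      have ht : t = [] := (PySem.List.sorted_eq_nil_iff _ _ _).mp hs
      subst ht
      rfl
    | cons m l =>
      have hmt : PySem.List.min? t (fun item => item.2) = some m := by rw [ih, hs]; rfl
      unfold PySem.List.min? at hmt ⊢
      rw [List.foldl_append, hmt]
      by_cases hx : x.2 < m.2 <;> simp [PySem.List.insertBy, hx]

-- ===== VERDICT =====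
theorem find_top_choice_py_spec : Claim_equal_find_top_choice_py := by
  intro preferences remaining_options _
  unfold Spec_find_top_choice_py find_top_choice_py find_top_choice_py_alt
  rw [← List.head?_filter, pv_sorted_filter, ← pv_min?_eq_head?_sorted]
  cases hf : preferences.filter (fun kv => remaining_options.contains kv.1) with
  | nil => rfl
  | cons a l =>
    simp only [List.isEmpty_cons, Bool.false_eq_true, if_false]
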